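-- pv_equiv track=rewrite | github.com/csaumenig/adventofcode | python/2021/aoc2021day3.py | get_place_counts
-- ===== SOURCE A (Python) =====
-- def get_place_counts(lines: list[str]) -> dict[int, dict[int, int]]:
--     place_counts: dict[int, dict[int, int]] = {}
--     for line in lines:
--         bin_str = line.strip()
--         place = 0
--         for b in bin_str:
--             count: dict[int, int] = place_counts.get(place)
--             if count is None:
--                 count = {}
--             if b == '0':
--                 count.update({0: count.get(0, 0) + 1})
--             elif b == '1':
--                 count.update({1: count.get(1, 0) + 1})
--             place_counts.update({place: count})
--             place += 1
--
--     return place_counts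
-- ===== SOURCE B (Python) =====
-- def get_place_counts(lines: list[str]) -> dict[int, dict[int, int]]:
--     # Column-major: strip once, then count each bit position across all lines.
--     stripped = [line.strip() for line in lines]
--     maxlen = 0
--     for s in stripped:
--         maxlen = max(maxlen, len(s))
--     result: dict[int, dict[int, int]] = {}
--     for place in range(maxlen):
--         counts: dict[int, int] = {}
--         for s in stripped:
--             if place < len(s):
--                 c = s[place]
--                 if c == '0':
--                     counts[0] = counts.get(0, 0) + 1
--                 elif c == '1':
--                     counts[1] = counts.get(1, 0) + 1
--         result[place] = counts
--     return result
-- ===== Notes on version B (the rewrite author's own statement) =====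
-- stated objective: alternative
-- what changed: Replaced A's row-by-row accumulation (per-line char loop updating a shared dict of dicts with a running place counter) by a column-major pass: strip all lines once, compute the maximum stripped length, then for each position 0..maxlen-1 build its counts dict fresh by scanning all stripped lines at that column.
import Mathlib
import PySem

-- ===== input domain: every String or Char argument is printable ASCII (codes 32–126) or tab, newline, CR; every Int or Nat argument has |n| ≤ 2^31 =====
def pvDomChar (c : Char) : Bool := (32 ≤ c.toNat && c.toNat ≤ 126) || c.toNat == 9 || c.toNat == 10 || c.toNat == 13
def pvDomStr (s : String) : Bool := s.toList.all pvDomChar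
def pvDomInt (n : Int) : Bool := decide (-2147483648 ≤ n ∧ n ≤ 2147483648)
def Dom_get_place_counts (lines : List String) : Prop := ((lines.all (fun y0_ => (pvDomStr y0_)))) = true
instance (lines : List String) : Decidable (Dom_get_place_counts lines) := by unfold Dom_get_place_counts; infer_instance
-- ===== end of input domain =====

-- B replaces A's row-by-row dict accumulation by a column-major pass over the stripped lines (alternative decomposition, same cost).


-- ===== PORT A =====
-- literal transliteration of A: outer loop over lines; inner loop over the stripped
-- line's chars carrying (place_counts, place); dict.get / update ported via PySem.Dict.
def get_place_counts (lines : List String) : List (Int × List (Int × Int)) :=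
  let pc : PySem.Dict Int (PySem.Dict Int Int) :=
    lines.foldl (fun pc line =>
      let bin_str := (PySem.Str.strip line).toList
      (bin_str.foldl (fun (st : PySem.Dict Int (PySem.Dict Int Int) × Int) b =>
        let count : PySem.Dict Int Int :=
          match st.1.get? st.2 with
          | none => PySem.Dict.empty
          | some c => c
        let count :=
          if b = '0' then count.insert 0 (count.getD 0 0 + 1)
          else if b = '1' then count.insert 1 (count.getD 1 0 + 1)
          else count
        (st.1.insert st.2 count, st.2 + 1)) (pc, (0 : Int))).1) PySem.Dict.empty
  pc.items.map (fun p => (p.1, p.2.items))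

-- ===== PORT B =====
-- literal transliteration of B (Source B): strip once, running max of lengths, then
-- one counts dict per column built by scanning all stripped lines.
def get_place_counts_alt (lines : List String) : List (Int × List (Int × Int)) :=
  let stripped := lines.map (fun line => (PySem.Str.strip line).toList)
  let maxlen := stripped.foldl (fun m s => max m s.length) 0
  (List.range maxlen).map (fun (place : Nat) =>
    ((place : Int),
      (stripped.foldl (fun (counts : PySem.Dict Int Int) s =>
        if place < s.length then
          let c := s.getD place ' '
          if c = '0' then counts.insert 0 (counts.getD 0 0 + 1)
          else if c = '1' then counts.insert 1 (counts.getD 1 0 + 1)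
          else counts
        else counts) PySem.Dict.empty).items))

-- ===== PRECONDITION & SPEC =====
def Spec_get_place_counts (lines : List String) (out : List (Int × List (Int × Int))) : Prop := out = get_place_counts_alt lines
instance (lines : List String) (out : List (Int × List (Int × Int))) : Decidable (Spec_get_place_counts lines out) := by unfold Spec_get_place_counts; infer_instance

-- ===== CLAIM (what is proved, stated in full; the proofs are below) =====
def Claim_equal_get_place_counts : Prop := ∀ (lines : List String), Dom_get_place_counts lines → Spec_get_place_counts lines (get_place_counts lines)

-- ===== LEMMAS AND PROOFS =====

-- the dict of dicts A maintains, as a function of an explicit shape: keys 0..m-1 in order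
def pvMkD (m : Nat) (f : Nat → PySem.Dict Int Int) : PySem.Dict Int (PySem.Dict Int Int) :=
  PySem.Dict.mk ((List.range m).map (fun (p : Nat) => ((p : Int), f p)))

-- the per-char update both programs perform
def pvUpd (cnt : PySem.Dict Int Int) (b : Char) : PySem.Dict Int Int :=
  if b = '0' then cnt.insert 0 (cnt.getD 0 0 + 1)
  else if b = '1' then cnt.insert 1 (cnt.getD 1 0 + 1)
  else cnt

-- A's inner (char) loop body and line loop, named so lemmas can speak about them
def pvStepA (st : PySem.Dict Int (PySem.Dict Int Int) × Int) (b : Char) :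
    PySem.Dict Int (PySem.Dict Int Int) × Int :=
  let count : PySem.Dict Int Int :=
    match st.1.get? st.2 with
    | none => PySem.Dict.empty
    | some c => c
  let count :=
    if b = '0' then count.insert 0 (count.getD 0 0 + 1)
    else if b = '1' then count.insert 1 (count.getD 1 0 + 1)
    else count
  (st.1.insert st.2 count, st.2 + 1)

-- B's column step
def pvStepB (place : Nat) (counts : PySem.Dict Int Int) (s : List Char) : PySem.Dict Int Int :=
  if place < s.length then
    let c := s.getD place ' '
    if c = '0' then counts.insert 0 (counts.getD 0 0 + 1)
    else if c = '1' then counts.insert 1 (counts.getD 1 0 + 1)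
    else counts
  else counts

theorem pvMkD_congr (m : Nat) (f g : Nat → PySem.Dict Int Int)
    (h : ∀ p, p < m → f p = g p) : pvMkD m f = pvMkD m g := by
  unfold pvMkD
  congr 1
  exact List.map_congr_left (fun p hp => by rw [h p (List.mem_range.mp hp)])

theorem pvMkD_get? (m : Nat) (f : Nat → PySem.Dict Int Int) (j : Nat) :
    (pvMkD m f).get? (j : Int) = if j < m then some (f j) else none := by
  have hnd : (pvMkD m f).keys.Nodup := by
    unfold pvMkD
    simp only [PySem.Dict.keys_mk, List.map_map]
    exact List.Nodup.map (fun a b hab => Nat.cast_injective (show ((a : Int)) = (b : Int) from hab)) List.nodup_range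
  by_cases hj : j < m
  · have hmem : ((j : Int), f j) ∈ (pvMkD m f).items := by
      unfold pvMkD
      exact List.mem_map.mpr ⟨j, List.mem_range.mpr hj, rfl⟩
    rw [PySem.Dict.get?_of_mem_items _ hmem hnd, if_pos hj]
  · rw [if_neg hj]
    rw [PySem.Dict.get?_eq_none_iff_not_mem_keys]
    unfold pvMkD
    simp only [PySem.Dict.keys_mk, List.map_map]
    intro hmem
    obtain ⟨p, hp, hpe⟩ := List.mem_map.mp hmem
    have : p = j := Nat.cast_injective (show ((p : Int)) = (j : Int) from hpe)
    exact hj (this ▸ List.mem_range.mp hp)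

theorem pvMkD_insert (m : Nat) (f : Nat → PySem.Dict Int Int) (j : Nat) (v : PySem.Dict Int Int)
    (h : j ≤ m) :
    (pvMkD m f).insert (j : Int) v = pvMkD (max m (j + 1)) (fun p => if p = j then v else f p) := by
  have hkeys : (pvMkD m f).keys = (List.range m).map (fun (p : Nat) => (p : Int)) := by
    unfold pvMkD
    simp only [PySem.Dict.keys_mk, List.map_map]
    rfl
  by_cases hj : j < m
  · have hc : (pvMkD m f).contains (j : Int) = true := by
      rw [PySem.Dict.contains_eq_decide_mem_keys, hkeys]
      simp only [decide_eq_true_eq]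
      exact List.mem_map.mpr ⟨j, List.mem_range.mpr hj, rfl⟩
    apply PySem.Dict.ext
    rw [PySem.Dict.items_insert, hc, if_pos rfl]
    show (((List.range m).map (fun (p : Nat) => ((p : Int), f p))).map
        (fun p => if p.1 == (j : Int) then ((j : Int), v) else p)) =
      (List.range (max m (j + 1))).map (fun (p : Nat) => ((p : Int), if p = j then v else f p))
    have hm : max m (j + 1) = m := by omega
    rw [hm, List.map_map]
    apply List.map_congr_left
    intro p _
    by_cases hpj : p = j
    · subst hpj; simp
    · have : ¬ ((p : Int) = (j : Int)) := fun h => hpj (Nat.cast_injective h)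
      simp [Function.comp, this, hpj]
  · have hj' : j = m := by omega
    subst hj'
    have hc : (pvMkD j f).contains (j : Int) = false := by
      rw [PySem.Dict.contains_eq_decide_mem_keys, hkeys]
      simp only [decide_eq_false_iff_not]
      intro hmem
      obtain ⟨p, hp, hpe⟩ := List.mem_map.mp hmem
      have hpj : p = j := Nat.cast_injective hpe
      exact absurd (List.mem_range.mp hp) (by omega)
    apply PySem.Dict.ext
    rw [PySem.Dict.items_insert, hc]
    show (((List.range j).map (fun (p : Nat) => ((p : Int), f p))) ++ [((j : Int), v)]) =
      (List.range (max j (j + 1))).map (fun (p : Nat) => ((p : Int), if p = j then v else f p))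
    have hm : max j (j + 1) = j + 1 := by omega
    rw [hm, List.range_succ, List.map_append]
    congr 1
    · apply List.map_congr_left
      intro p hp
      have : p ≠ j := Nat.ne_of_lt (List.mem_range.mp hp)
      simp [this]
    · simp

theorem pv_inner (t : List Char) (m j : Nat) (f : Nat → PySem.Dict Int Int) (h : j ≤ m) :
    t.foldl pvStepA (pvMkD m f, (j : Int)) =
      (pvMkD (max m (j + t.length))
        (fun p => if j ≤ p ∧ p < j + t.length
          then pvUpd (if p < m then f p else PySem.Dict.empty) (t.getD (p - j) ' ')
          else f p),
       ((j + t.length : Nat) : Int)) := by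
  induction t generalizing m j f with
  | nil =>
    rw [List.foldl_nil]
    have hM : max m (j + List.length ([] : List Char)) = m := by
      simp only [List.length_nil]; omega
    rw [hM]
    refine congrArg₂ Prod.mk ?_ (by simp)
    refine (pvMkD_congr _ _ _ (fun p hp => ?_)).symm
    have : ¬ (j ≤ p ∧ p < j + List.length ([] : List Char)) := by
      simp only [List.length_nil]; omega
    rw [if_neg this]
  | cons b t ih =>
    have hget : (match (pvMkD m f).get? (j : Int) with
        | none => (PySem.Dict.empty : PySem.Dict Int Int)
        | some c => c) = (if j < m then f j else PySem.Dict.empty) := by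
      rw [pvMkD_get?]
      by_cases hj : j < m <;> simp [hj]
    have hstep : pvStepA (pvMkD m f, (j : Int)) b =
        (pvMkD (max m (j + 1))
          (fun p => if p = j then pvUpd (if j < m then f j else PySem.Dict.empty) b else f p),
         ((j : Int) + 1)) := by
      show ((pvMkD m f).insert (j : Int) (pvUpd (match (pvMkD m f).get? (j : Int) with
          | none => (PySem.Dict.empty : PySem.Dict Int Int)
          | some c => c) b), ((j : Int) + 1)) = _
      rw [hget, pvMkD_insert m f j _ h]
    have hc : ((j : Int) + 1) = ((j + 1 : Nat) : Int) := by push_cast; ring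
    calc (b :: t).foldl pvStepA (pvMkD m f, (j : Int))
        = t.foldl pvStepA
            (pvMkD (max m (j + 1))
              (fun p => if p = j then pvUpd (if j < m then f j else PySem.Dict.empty) b else f p),
             ((j + 1 : Nat) : Int)) := by
          rw [List.foldl_cons, hstep, hc]
      _ = (pvMkD (max (max m (j + 1)) ((j + 1) + t.length))
            (fun p => if (j + 1) ≤ p ∧ p < (j + 1) + t.length
              then pvUpd (if p < max m (j + 1)
                  then (if p = j then pvUpd (if j < m then f j else PySem.Dict.empty) b else f p)
                  else PySem.Dict.empty) (t.getD (p - (j + 1)) ' ')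
              else (if p = j then pvUpd (if j < m then f j else PySem.Dict.empty) b else f p)),
           (((j + 1) + t.length : Nat) : Int)) :=
          ih (max m (j + 1)) (j + 1) _ (Nat.le_max_right m (j + 1))
      _ = _ := by
          simp only [List.length_cons]
          have hM : max (max m (j + 1)) ((j + 1) + t.length) = max m (j + (t.length + 1)) := by
            omega
          have hn : ((j + 1) + t.length : Nat) = (j + (t.length + 1) : Nat) := by omega
          rw [hM, hn]
          refine congrArg₂ Prod.mk ?_ rfl
          refine congrArg (pvMkD _) ?_
          funext p
          by_cases hpj : p = j
          · subst hpj
            rw [if_neg (show ¬ (p + 1 ≤ p ∧ p < p + (t.length + 1)) by omega),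
                if_pos (show p ≤ p ∧ p < p + (t.length + 1) by omega),
                if_pos rfl, Nat.sub_self, List.getD_cons_zero]
          · by_cases hin : (j + 1) ≤ p ∧ p < j + (t.length + 1)
            · rw [if_pos hin, if_pos (show j ≤ p ∧ p < j + (t.length + 1) by omega), if_neg hpj]
              have hcond : (if p < max m (j + 1) then f p else PySem.Dict.empty)
                  = (if p < m then f p else PySem.Dict.empty) := by
                by_cases hpm : p < m
                · rw [if_pos hpm, if_pos (show p < max m (j + 1) by omega)]
                · rw [if_neg hpm, if_neg (show ¬ p < max m (j + 1) by omega)]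
              rw [hcond, (show p - j = (p - (j + 1)) + 1 by omega), List.getD_cons_succ]
            · rw [if_neg hin,
                  if_neg (show ¬ (j ≤ p ∧ p < j + (t.length + 1)) by omega), if_neg hpj]

theorem pv_outer (cols : List (List Char)) (m : Nat) (f : Nat → PySem.Dict Int Int) :
    cols.foldl (fun pc s => (s.foldl pvStepA (pc, (0 : Int))).1) (pvMkD m f) =
      pvMkD (cols.foldl (fun a s => max a s.length) m)
        (fun p => cols.foldl (fun cnt s => pvStepB p cnt s)
          (if p < m then f p else PySem.Dict.empty)) := by
  induction cols generalizing m f with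
  | nil =>
    rw [List.foldl_nil, List.foldl_nil]
    exact (pvMkD_congr _ _ _ (fun p hp => by rw [List.foldl_nil, if_pos hp])).symm
  | cons s cols ih =>
    have hstart : (s.foldl pvStepA (pvMkD m f, (0 : Int))).1
        = pvMkD (max m (0 + s.length))
            (fun p => if 0 ≤ p ∧ p < 0 + s.length
              then pvUpd (if p < m then f p else PySem.Dict.empty) (s.getD (p - 0) ' ')
              else f p) := by
      rw [(show (0 : Int) = ((0 : Nat) : Int) by simp), pv_inner s m 0 f (Nat.zero_le m)]
    calc (s :: cols).foldl (fun pc s => (s.foldl pvStepA (pc, (0 : Int))).1) (pvMkD m f)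
        = cols.foldl (fun pc s => (s.foldl pvStepA (pc, (0 : Int))).1)
            ((s.foldl pvStepA (pvMkD m f, (0 : Int))).1) := rfl
      _ = cols.foldl (fun pc s => (s.foldl pvStepA (pc, (0 : Int))).1)
            (pvMkD (max m (0 + s.length))
              (fun p => if 0 ≤ p ∧ p < 0 + s.length
                then pvUpd (if p < m then f p else PySem.Dict.empty) (s.getD (p - 0) ' ')
                else f p)) := by
          rw [hstart]
      _ = pvMkD (cols.foldl (fun a s => max a s.length) (max m (0 + s.length)))
            (fun p => cols.foldl (fun cnt s => pvStepB p cnt s)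
              (if p < max m (0 + s.length)
                then (if 0 ≤ p ∧ p < 0 + s.length
                  then pvUpd (if p < m then f p else PySem.Dict.empty) (s.getD (p - 0) ' ')
                  else f p)
                else PySem.Dict.empty)) := ih _ _
      _ = _ := by
          have hz : (0 + s.length : Nat) = s.length := by omega
          rw [hz]
          show pvMkD (cols.foldl (fun a s => max a s.length) (max m s.length)) _
             = pvMkD (cols.foldl (fun a s => max a s.length) (max m s.length)) _
          refine congrArg (pvMkD _) ?_
          funext p
          have hinit : (if p < max m s.length
                then (if 0 ≤ p ∧ p < s.length
                  then pvUpd (if p < m then f p else PySem.Dict.empty) (s.getD (p - 0) ' ')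
                  else f p)
                else PySem.Dict.empty)
              = pvStepB p (if p < m then f p else PySem.Dict.empty) s := by
            by_cases hps : p < s.length
            · simp only [pvStepB, pvUpd, if_pos hps,
                if_pos (show p < max m s.length by omega),
                if_pos (show (0:Nat) ≤ p ∧ p < s.length by omega), Nat.sub_zero]
            · by_cases hpm : p < m
              · simp only [pvStepB, if_neg hps, if_pos hpm,
                  if_pos (show p < max m s.length by omega),
                  if_neg (show ¬ ((0:Nat) ≤ p ∧ p < s.length) by omega)]
              · simp only [pvStepB, if_neg hps, if_neg hpm,
                  if_neg (show ¬ p < max m s.length by omega)]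
          rw [hinit, List.foldl_cons]

-- ===== VERDICT (by name: the statement is the Claim_ definition above) =====
theorem pvMkD_items (m : Nat) (f : Nat → PySem.Dict Int Int) :
    (pvMkD m f).items = (List.range m).map (fun (p : Nat) => ((p : Int), f p)) := rfl

theorem get_place_counts_spec : Claim_equal_get_place_counts := by
  intro lines _
  show get_place_counts lines = get_place_counts_alt lines
  calc get_place_counts lines
      = (lines.foldl (fun pc line =>
          (((PySem.Str.strip line).toList).foldl pvStepA (pc, (0 : Int))).1)
          (pvMkD 0 (fun _ => PySem.Dict.empty))).items.map (fun p => (p.1, p.2.items)) := rfl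
    _ = ((lines.map (fun l => (PySem.Str.strip l).toList)).foldl
          (fun pc s => (s.foldl pvStepA (pc, (0 : Int))).1)
          (pvMkD 0 (fun _ => PySem.Dict.empty))).items.map (fun p => (p.1, p.2.items)) := by
        rw [List.foldl_map]
    _ = (pvMkD ((lines.map (fun l => (PySem.Str.strip l).toList)).foldl
            (fun a s => max a s.length) 0)
          (fun p => (lines.map (fun l => (PySem.Str.strip l).toList)).foldl
            (fun cnt s => pvStepB p cnt s)
            (if p < 0 then PySem.Dict.empty else PySem.Dict.empty))).items.map
          (fun p => (p.1, p.2.items)) := by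
        rw [pv_outer]
    _ = get_place_counts_alt lines := by
        show _ = (List.range ((lines.map (fun l => (PySem.Str.strip l).toList)).foldl
            (fun a s => max a s.length) 0)).map
          (fun (p : Nat) => ((p : Int),
            ((lines.map (fun l => (PySem.Str.strip l).toList)).foldl
              (fun cnt s => pvStepB p cnt s) PySem.Dict.empty).items))
        rw [pvMkD_items, List.map_map]
        apply List.map_congr_left
        intro p _
        simp [Function.comp_apply]
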